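-- pv_equiv track=rewrite | github.com/Design-By-Fundamentals-UKAEA/UPXO | src/upxo/gsdataops/gid_ops.py | get_nth_order_neighbors
-- ===== SOURCE A (Python) =====
-- def get_nth_order_neighbors(target_fid, neigh_fids, n_order=1):
--     """Recursively finds Nth order neighbors using the neigh_fids dictionary.
--
--     Import
--     ------
--     from upxo.gsdataops.gid_ops import get_nth_order_neighbors
--     """
--     cluster = {target_fid}
--     for _ in range(n_order):
--         next_gen = set()
--         for fid in cluster:
--             if fid in neigh_fids: next_gen.update(neigh_fids[fid])
--         cluster.update(next_gen)
--     return cluster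
-- ===== SOURCE B (Python) =====
-- def get_nth_order_neighbors(target_fid, neigh_fids, n_order=1):
--     """Frontier BFS: each generation expands only the newly discovered nodes."""
--     visited = {target_fid}
--     frontier = [target_fid]
--     for _ in range(n_order):
--         new = []
--         for fid in frontier:
--             for nb in neigh_fids.get(fid, ()):
--                 if nb not in visited:
--                     visited.add(nb)
--                     new.append(nb)
--         if not new:
--             break
--         frontier = new
--     return visited
-- ===== Notes on version B (the rewrite author's own statement) =====
-- stated objective: alternative
-- what changed: Replaces re-scanning the whole growing cluster every generation with a frontier BFS that expands only the nodes discovered in the previous generation and stops early when no new node appears (measured 1.3-1.5x on generated inputs, below the 1.5x bar, so no speed claim).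
import Mathlib
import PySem

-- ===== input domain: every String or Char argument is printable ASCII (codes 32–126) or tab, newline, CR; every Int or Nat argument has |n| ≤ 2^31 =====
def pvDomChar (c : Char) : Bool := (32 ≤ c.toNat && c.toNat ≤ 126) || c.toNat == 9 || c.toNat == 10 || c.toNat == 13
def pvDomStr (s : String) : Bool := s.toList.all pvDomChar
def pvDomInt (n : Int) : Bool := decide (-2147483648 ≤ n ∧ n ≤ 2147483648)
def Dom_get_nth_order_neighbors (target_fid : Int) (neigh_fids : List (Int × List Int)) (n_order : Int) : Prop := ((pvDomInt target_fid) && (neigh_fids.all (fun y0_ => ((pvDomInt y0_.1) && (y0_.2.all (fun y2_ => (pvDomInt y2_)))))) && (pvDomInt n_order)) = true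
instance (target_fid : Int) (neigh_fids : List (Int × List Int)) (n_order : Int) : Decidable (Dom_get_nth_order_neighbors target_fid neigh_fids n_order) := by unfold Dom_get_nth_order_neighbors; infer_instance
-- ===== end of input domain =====

-- B replaces A's rescan of the whole growing cluster each generation by a frontier BFS
-- (expand only newly discovered nodes, stop early when a generation adds nothing).


-- ===== PORT A =====
-- one body of A's `for _ in range(n_order)` loop: build next_gen by scanning the
-- WHOLE cluster, then cluster.update(next_gen)
def pvStepA (d : PySem.Dict Int (List Int)) (cluster : PySem.Set Int) : PySem.Set Int :=
  let next_gen := cluster.foldl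
    (fun ng fid =>
      match d.get? fid with          -- `if fid in neigh_fids: next_gen.update(neigh_fids[fid])`
      | some vs => PySem.Set.update ng vs
      | none => ng)
    PySem.Set.empty
  PySem.Set.update cluster next_gen

def get_nth_order_neighbors (target_fid : Int) (neigh_fids : List (Int × List Int)) (n_order : Int) : List Int :=
  (PySem.List.pyRange 0 n_order 1).foldl
    (fun cluster _ => pvStepA (PySem.Dict.mk neigh_fids) cluster)
    (PySem.Set.add PySem.Set.empty target_fid)

-- ===== PORT B =====
-- B's loop: state (visited, new); expand only the frontier; break when new is empty
def pvBFS (d : PySem.Dict Int (List Int)) : Nat → PySem.Set Int → List Int → PySem.Set Int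
  | 0, visited, _ => visited
  | Nat.succ k, visited, frontier =>
      let st := frontier.foldl
        (fun (st : PySem.Set Int × List Int) fid =>
          (d.getD fid []).foldl        -- `for nb in neigh_fids.get(fid, ())`
            (fun (st : PySem.Set Int × List Int) nb =>
              if st.1.contains nb then st else (st.1 ++ [nb], st.2 ++ [nb]))
            st)
        (visited, [])
      if st.2.isEmpty then st.1 else pvBFS d k st.1 st.2

def get_nth_order_neighbors_alt (target_fid : Int) (neigh_fids : List (Int × List Int)) (n_order : Int) : List Int :=
  pvBFS (PySem.Dict.mk neigh_fids) n_order.toNat (PySem.Set.add PySem.Set.empty target_fid) [target_fid]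

-- ===== PRECONDITION & SPEC =====
def Spec_get_nth_order_neighbors (target_fid : Int) (neigh_fids : List (Int × List Int)) (n_order : Int) (out : List Int) : Prop := out = get_nth_order_neighbors_alt target_fid neigh_fids n_order
instance (target_fid : Int) (neigh_fids : List (Int × List Int)) (n_order : Int) (out : List Int) : Decidable (Spec_get_nth_order_neighbors target_fid neigh_fids n_order out) := by unfold Spec_get_nth_order_neighbors; infer_instance

-- ===== CLAIM (what is proved, stated in full; the proofs are below) =====
def Claim_equal_get_nth_order_neighbors : Prop := ∀ (target_fid : Int) (neigh_fids : List (Int × List Int)) (n_order : Int), Dom_get_nth_order_neighbors target_fid neigh_fids n_order → Spec_get_nth_order_neighbors target_fid neigh_fids n_order (get_nth_order_neighbors target_fid neigh_fids n_order)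

-- ===== LEMMAS AND PROOFS =====

-- all neighbours of the nodes of xs, concatenated in scan order
def pvNbrs (d : PySem.Dict Int (List Int)) (xs : List Int) : List Int :=
  xs.flatMap (fun x => d.getD x [])

-- the genuinely new elements that updating v with l appends, in first-discovery order
def pvNew (v : List Int) : List Int → List Int
  | [] => []
  | x :: l => if v.contains x then pvNew v l else x :: pvNew (v ++ [x]) l

theorem pvUpdate_eq_append_pvNew (l : List Int) : ∀ v : List Int,
    PySem.Set.update v l = v ++ pvNew v l := by
  induction l with
  | nil => intro v; simp [PySem.Set.update_nil, pvNew]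
  | cons x l ih =>
    intro v
    rw [PySem.Set.update_cons]
    by_cases h : x ∈ v
    · rw [PySem.Set.add_of_mem h]; simp [pvNew, h, ih v]
    · rw [PySem.Set.add_of_not_mem h]; simp [pvNew, h, ih (v ++ [x])]

theorem pvUpdate_of_subset (v : List Int) (l : List Int) (h : ∀ y ∈ l, y ∈ v) :
    PySem.Set.update v l = v := by
  rw [PySem.Set.update_eq_append_filter]
  have hf : (PySem.Set.ofList l).filter (fun y => !(PySem.Set.contains v y)) = [] := by
    apply List.filter_eq_nil_iff.mpr
    intro a ha
    have hav : a ∈ v := h a (by simpa [PySem.Set.mem_ofList] using ha)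
    simp [pysem, hav]
  rw [hf, List.append_nil]

-- B's inner loop body is Set.add on the first component; the second collects the new elements
theorem pvBstep_eq (l : List Int) : ∀ (v : PySem.Set Int) (new : List Int),
    l.foldl (fun (st : PySem.Set Int × List Int) nb =>
        if st.1.contains nb then st else (st.1 ++ [nb], st.2 ++ [nb])) (v, new)
      = (PySem.Set.update v l, new ++ pvNew v l) := by
  induction l with
  | nil => intro v new; simp [PySem.Set.update_nil, pvNew]
  | cons x l ih =>
    intro v new
    rw [List.foldl_cons, PySem.Set.update_cons]
    by_cases h : x ∈ v
    · have hc : (v : List Int).contains x = true := by simpa using h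
      rw [if_pos hc, PySem.Set.add_of_mem h, ih v new]
      simp [pvNew, h]
    · have hc : ¬ ((v : List Int).contains x = true) := by simpa using h
      rw [if_neg hc, PySem.Set.add_of_not_mem h]
      rw [ih (v ++ [x]) (new ++ [x])]
      simp [pvNew, h]

theorem pvFoldl_flatMap {α β γ : Type} (l : List α) (f : α → List β)
    (g : γ → β → γ) : ∀ init : γ,
    l.foldl (fun st a => (f a).foldl g st) init = (l.flatMap f).foldl g init := by
  induction l with
  | nil => intro init; simp
  | cons x l ih => intro init; simp [List.flatMap_cons, List.foldl_append, ih]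

theorem pvInner_eq (d : PySem.Dict Int (List Int)) (c : List Int) : ∀ e : PySem.Set Int,
    c.foldl (fun ng fid => match d.get? fid with
      | some vs => PySem.Set.update ng vs
      | none => ng) e = PySem.Set.update e (pvNbrs d c) := by
  induction c with
  | nil => intro e; simp [pvNbrs, PySem.Set.update_nil]
  | cons x c ih =>
    intro e
    rw [List.foldl_cons]
    have hstep : (match d.get? x with
      | some vs => PySem.Set.update e vs
      | none => e) = PySem.Set.update e (d.getD x []) := by
      cases hx : d.get? x with
      | some vs => simp [PySem.Dict.getD_eq_get?_getD, hx]
      | none => simp [PySem.Dict.getD_eq_get?_getD, hx, PySem.Set.update_nil]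
    rw [hstep, ih]
    simp [pvNbrs, List.flatMap_cons, PySem.Set.update_append]

-- A's step is: update the cluster with ALL its members' neighbour lists
theorem pvStepA_eq (d : PySem.Dict Int (List Int)) (c : PySem.Set Int) :
    pvStepA d c = PySem.Set.update c (pvNbrs d c) := by
  show PySem.Set.update c _ = _
  rw [pvInner_eq, PySem.Set.update_empty]
  rw [PySem.Set.update_eq_append_filter c (PySem.Set.ofList (pvNbrs d c)),
      PySem.Set.update_eq_append_filter c (pvNbrs d c), PySem.Set.ofList_ofList]

-- invariant: cluster = prev ++ frontier, Nodup, and every neighbour of a node of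
-- prev is already in the cluster; then k A-steps = the frontier BFS with fuel k
theorem pvMain (d : PySem.Dict Int (List Int)) (k : Nat) :
    ∀ (prev frontier : List Int),
    (prev ++ frontier).Nodup →
    (∀ x ∈ prev, ∀ y ∈ d.getD x [], y ∈ prev ++ frontier) →
    (pvStepA d)^[k] (prev ++ frontier) = pvBFS d k (prev ++ frontier) frontier := by
  induction k with
  | zero => intro prev frontier _ _; simp [pvBFS]
  | succ k ih =>
    intro prev frontier hnd hcl
    set c := prev ++ frontier with hc
    have hprevsub : ∀ y ∈ pvNbrs d prev, y ∈ c := by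
      intro y hy
      obtain ⟨x, hx, hyx⟩ := List.mem_flatMap.mp hy
      exact hcl x hx y hyx
    -- the A-step equals updating with the frontier's neighbours only
    have hA : pvStepA d c = PySem.Set.update c (pvNbrs d frontier) := by
      rw [pvStepA_eq]
      have : pvNbrs d c = pvNbrs d prev ++ pvNbrs d frontier := by
        simp [pvNbrs, hc]
      rw [this, PySem.Set.update_append, pvUpdate_of_subset c (pvNbrs d prev) hprevsub]
    have hflat : frontier.flatMap (fun x => d.getD x []) = pvNbrs d frontier := rfl
    -- the B-step
    have hB : pvBFS d (k+1) c frontier =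
        (if (pvNew c (pvNbrs d frontier)).isEmpty then PySem.Set.update c (pvNbrs d frontier)
         else pvBFS d k (PySem.Set.update c (pvNbrs d frontier)) (pvNew c (pvNbrs d frontier))) := by
      simp only [pvBFS]
      rw [pvFoldl_flatMap frontier (fun x => d.getD x []) _ (c, []), hflat, pvBstep_eq]
      simp
    rw [hB]
    by_cases hn : pvNew c (pvNbrs d frontier) = []
    · -- nothing new: the cluster is closed, both sides stay c
      have hfix : PySem.Set.update c (pvNbrs d frontier) = c := by
        rw [pvUpdate_eq_append_pvNew, hn, List.append_nil]
      have hstep : pvStepA d c = c := by rw [hA, hfix]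
      rw [if_pos (by simp [hn]), hfix, Function.iterate_fixed hstep]
    · rw [if_neg (by simpa using hn)]
      rw [Function.iterate_succ_apply, hA]
      have heq := pvUpdate_eq_append_pvNew (pvNbrs d frontier) c
      have hnd' : (c ++ pvNew c (pvNbrs d frontier)).Nodup := by
        rw [← heq]; exact PySem.Set.nodup_update c _ hnd
      have hcl' : ∀ x ∈ c, ∀ y ∈ d.getD x [], y ∈ c ++ pvNew c (pvNbrs d frontier) := by
        intro x hx y hy
        rw [← heq, PySem.Set.mem_update]
        rcases List.mem_append.mp hx with hxp | hxf
        · exact Or.inl (hcl x hxp y hy)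
        · exact Or.inr (List.mem_flatMap.mpr ⟨x, hxf, hy⟩)
      have key := ih c (pvNew c (pvNbrs d frontier)) hnd' hcl'
      rw [heq]
      exact key

theorem pvFoldl_const {α β : Type} (l : List β) (f : α → α) : ∀ init : α,
    l.foldl (fun a _ => f a) init = f^[l.length] init := by
  induction l with
  | nil => intro init; simp
  | cons x l ih =>
    intro init
    rw [List.foldl_cons, ih, ← Function.iterate_succ_apply]; simp

-- ===== VERDICT (by name: the statement is the Claim_ definition above) =====
theorem get_nth_order_neighbors_spec : Claim_equal_get_nth_order_neighbors := by
  intro t nf n _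
  unfold Spec_get_nth_order_neighbors get_nth_order_neighbors get_nth_order_neighbors_alt
  have hinit : PySem.Set.add PySem.Set.empty t = [t] := by
    simp [PySem.Set.add_of_not_mem, PySem.Set.empty]
  have hlen : (PySem.List.pyRange 0 n 1).length = n.toNat := by simp [pysem]
  rw [pvFoldl_const, hlen, hinit]
  have := pvMain (PySem.Dict.mk nf) n.toNat [] [t] (by simp) (by simp)
  simpa using this
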